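-- pv_equiv track=rewrite | github.com/gauneg/llm_experiments | self_eval.py | check_and_insert
-- ===== SOURCE A (Python) =====
-- def check_and_insert(targ_dict: dict, gold_set: set, pred_set: set) -> dict:
--     TP_INDEX = 0
--     FP_INDEX = 1
--     FN_INDEX = 2
--     GOLD_CNT = 3
--     PRED_CNT = 4
--     TP = pred_set.intersection(gold_set)
--     FP = pred_set - gold_set
--     FN = gold_set - pred_set
--     for elem in TP:
--         if elem not in targ_dict.keys():
--             targ_dict[elem] = [0, 0, 0, 0, 0]
--         targ_dict[elem][TP_INDEX] += 1
--
--     for elem in FP: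
--         if elem not in targ_dict.keys():
--             targ_dict[elem] = [0, 0, 0, 0, 0]
--         targ_dict[elem][FP_INDEX] += 1
--
--     for elem in FN:
--         if elem not in targ_dict.keys():
--             targ_dict[elem] = [0, 0, 0, 0, 0]
--         targ_dict[elem][FN_INDEX] += 1
--
--     for elem in gold_set:
--         if elem not in targ_dict.keys():
--             targ_dict[elem] = [0, 0, 0, 0, 0]
--         targ_dict[elem][GOLD_CNT] += 1
--
--     for elem in pred_set:
--         if elem not in targ_dict.keys():
--             targ_dict[elem] = [0, 0, 0, 0, 0]
--         targ_dict[elem][PRED_CNT] += 1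
--
--     return targ_dict
-- ===== SOURCE B (Python) =====
-- def check_and_insert(targ_dict: dict, gold_set: set, pred_set: set) -> dict:
--     # One pass over gold|pred instead of five scans over derived partition sets:
--     # each element's whole counter row is settled by a single membership dispatch.
--     for elem in gold_set | pred_set:
--         row = targ_dict.setdefault(elem, [0, 0, 0, 0, 0])
--         if elem in gold_set and elem in pred_set:
--             row[0] += 1  # TP
--             row[3] += 1  # GOLD
--             row[4] += 1  # PRED
--         elif elem in pred_set:
--             row[1] += 1  # FP
--             row[4] += 1  # PRED
--         else:
--             row[2] += 1  # FN
--             row[3] += 1  # GOLD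
--     return targ_dict
-- ===== Notes on version B (the rewrite author's own statement) =====
-- stated objective: simpler
-- what changed: Replaces A's construction of TP/FP/FN partition sets and five separate increment loops over them by a single pass over gold_set | pred_set that settles each element's whole counter row with one membership dispatch (setdefault + if/elif).
import Mathlib
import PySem

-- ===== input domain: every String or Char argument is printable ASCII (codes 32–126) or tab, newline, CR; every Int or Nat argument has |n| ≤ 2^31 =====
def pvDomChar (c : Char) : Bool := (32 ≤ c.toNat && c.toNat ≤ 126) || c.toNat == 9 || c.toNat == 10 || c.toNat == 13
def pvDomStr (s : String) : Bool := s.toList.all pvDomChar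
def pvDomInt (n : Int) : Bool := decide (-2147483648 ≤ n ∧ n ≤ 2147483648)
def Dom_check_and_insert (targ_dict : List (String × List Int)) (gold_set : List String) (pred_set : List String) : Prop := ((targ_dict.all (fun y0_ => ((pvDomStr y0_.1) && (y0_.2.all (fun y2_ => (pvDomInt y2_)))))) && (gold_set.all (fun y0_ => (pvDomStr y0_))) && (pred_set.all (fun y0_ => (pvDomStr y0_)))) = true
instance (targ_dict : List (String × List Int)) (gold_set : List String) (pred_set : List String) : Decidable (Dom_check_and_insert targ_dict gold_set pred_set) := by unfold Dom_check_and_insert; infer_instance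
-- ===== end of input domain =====

-- B replaces A's five scans over derived partition sets by one membership-dispatch pass over
-- gold|pred (objective: simpler). Python A mutates targ_dict in place and returns it (B does the
-- same); the equivalence proved here is about the RETURN value. Python's set iteration order is
-- unspecified and dict outputs are compared ignoring order, so each port enumerates its sets in
-- a fixed order (noted at the enumeration).

-- ===== PORT A =====
def pvFresh : List Int := [0, 0, 0, 0, 0]

-- row[i] += 1 ; exact when i < row.length (Pre_ guarantees this for every index A touches)
def pvBump (i : Nat) (v : List Int) : List Int := v.set i (v.getD i 0 + 1)

-- one iteration of any of A's five loops:
-- 'if elem not in targ_dict.keys(): targ_dict[elem] = [0,0,0,0,0]' then 'targ_dict[elem][i] += 1'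
-- (the key is present when modify runs, so the modify default is irrelevant; pvFresh is passed)
def pvStepA (i : Nat) (d : PySem.Dict String (List Int)) (e : String) : PySem.Dict String (List Int) :=
  (if d.contains e then d else d.insert e pvFresh).modify e pvFresh (pvBump i)

-- sets TP/FP/FN are enumerated in the order of the list they are filtered from (set iteration
-- order is unspecified in Python; the dict result is compared ignoring order)
def check_and_insert (targ_dict : List (String × List Int)) (gold_set : List String) (pred_set : List String) : List (String × List Int) :=
  let TP := pred_set.filter (fun e => gold_set.contains e)
  let FP := pred_set.filter (fun e => !gold_set.contains e)
  let FN := gold_set.filter (fun e => !pred_set.contains e)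
  let d0 := PySem.Dict.mk targ_dict
  let d1 := TP.foldl (pvStepA 0) d0
  let d2 := FP.foldl (pvStepA 1) d1
  let d3 := FN.foldl (pvStepA 2) d2
  let d4 := gold_set.foldl (pvStepA 3) d3
  let d5 := pred_set.foldl (pvStepA 4) d4
  d5.items

-- ===== PORT B =====
-- one iteration of B's single loop: setdefault the row, then bump by membership dispatch
def pvStepB (gold_set pred_set : List String) (d : PySem.Dict String (List Int)) (e : String) : PySem.Dict String (List Int) :=
  let d' := d.setdefault e pvFresh
  if gold_set.contains e && pred_set.contains e then
    ((d'.modify e pvFresh (pvBump 0)).modify e pvFresh (pvBump 3)).modify e pvFresh (pvBump 4)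
  else if pred_set.contains e then
    (d'.modify e pvFresh (pvBump 1)).modify e pvFresh (pvBump 4)
  else
    (d'.modify e pvFresh (pvBump 2)).modify e pvFresh (pvBump 3)

-- gold_set | pred_set enumerated in a fixed order (Python's set iteration order is unspecified
-- and the dict result is compared ignoring order): elements in both, then pred-only, then gold-only
def check_and_insert_alt (targ_dict : List (String × List Int)) (gold_set : List String) (pred_set : List String) : List (String × List Int) :=
  let union := pred_set.filter (fun e => gold_set.contains e)
    ++ pred_set.filter (fun e => !gold_set.contains e)
    ++ gold_set.filter (fun e => !pred_set.contains e)
  (union.foldl (pvStepB gold_set pred_set) (PySem.Dict.mk targ_dict)).items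

-- ===== PRECONDITION & SPEC =====
-- Pre_ excludes exactly (a) inputs a Python dict/set cannot represent under the type convention
-- (duplicate keys or set elements) and (b) inputs on which A raises IndexError: a pre-existing
-- row shorter than the indices A increments for its key (index 4 for keys in pred, index 3 for
-- keys only in gold).
def Pre_check_and_insert (targ_dict : List (String × List Int)) (gold_set : List String) (pred_set : List String) : Prop :=
  (targ_dict.map Prod.fst).Nodup ∧ gold_set.Nodup ∧ pred_set.Nodup ∧
    ∀ p ∈ targ_dict, (p.1 ∈ pred_set → 5 ≤ p.2.length) ∧ (p.1 ∉ pred_set → p.1 ∈ gold_set → 4 ≤ p.2.length)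
instance (targ_dict : List (String × List Int)) (gold_set : List String) (pred_set : List String) : Decidable (Pre_check_and_insert targ_dict gold_set pred_set) := by unfold Pre_check_and_insert; infer_instance

def pvWitness_check_and_insert : (List (String × List Int)) × List String × List String :=
  ([("a", [1, 0, 2, 3, 1])], ["a", "b"], ["b", "c"])

def Spec_check_and_insert (targ_dict : List (String × List Int)) (gold_set : List String) (pred_set : List String) (out : List (String × List Int)) : Prop := out = check_and_insert_alt targ_dict gold_set pred_set
instance (targ_dict : List (String × List Int)) (gold_set : List String) (pred_set : List String) (out : List (String × List Int)) : Decidable (Spec_check_and_insert targ_dict gold_set pred_set out) := by unfold Spec_check_and_insert; infer_instance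

-- ===== CLAIM (what is proved, stated in full; the proofs are below) =====
def Claim_equal_check_and_insert : Prop := ∀ (targ_dict : List (String × List Int)) (gold_set : List String) (pred_set : List String), Dom_check_and_insert targ_dict gold_set pred_set → Pre_check_and_insert targ_dict gold_set pred_set → Spec_check_and_insert targ_dict gold_set pred_set (check_and_insert targ_dict gold_set pred_set)

-- ===== LEMMAS AND PROOFS =====

-- generic fold facts for key-local steps -----------------------------------------------------

theorem pv_getD_foldl_of_not_mem (f : PySem.Dict String (List Int) → String → PySem.Dict String (List Int))
    (hloc : ∀ d e k, k ≠ e → (f d e).getD k pvFresh = d.getD k pvFresh)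
    (l : List String) (d : PySem.Dict String (List Int)) (k : String) (hk : k ∉ l) :
    (l.foldl f d).getD k pvFresh = d.getD k pvFresh := by
  induction l generalizing d with
  | nil => rfl
  | cons e t ih =>
    simp only [List.mem_cons, not_or] at hk
    rw [List.foldl_cons, ih _ hk.2, hloc _ _ _ hk.1]

theorem pv_getD_foldl_of_mem (f : PySem.Dict String (List Int) → String → PySem.Dict String (List Int))
    (g : List Int → List Int)
    (hloc : ∀ d e k, k ≠ e → (f d e).getD k pvFresh = d.getD k pvFresh)
    (l : List String)
    (hself : ∀ d, ∀ e ∈ l, (f d e).getD e pvFresh = g (d.getD e pvFresh))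
    (hnd : l.Nodup) (d : PySem.Dict String (List Int)) (k : String) (hk : k ∈ l) :
    (l.foldl f d).getD k pvFresh = g (d.getD k pvFresh) := by
  induction l generalizing d with
  | nil => cases hk
  | cons e t ih =>
    rcases List.mem_cons.mp hk with rfl | hkt
    · rw [List.foldl_cons,
        pv_getD_foldl_of_not_mem f hloc t _ k ((List.nodup_cons.mp hnd).1),
        hself d k (List.mem_cons_self)]
    · have hke : k ≠ e := fun h => (List.nodup_cons.mp hnd).1 (h ▸ hkt)
      rw [List.foldl_cons,
        ih (fun d' e' he' => hself d' e' (List.mem_cons_of_mem _ he'))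
          (List.nodup_cons.mp hnd).2 _ hkt,
        hloc _ _ _ hke]

theorem pv_keys_foldl (f : PySem.Dict String (List Int) → String → PySem.Dict String (List Int))
    (hkeys : ∀ d e, (f d e).keys = PySem.Set.add d.keys e)
    (l : List String) (d : PySem.Dict String (List Int)) :
    (l.foldl f d).keys = PySem.Set.update d.keys l := by
  induction l generalizing d with
  | nil => rfl
  | cons e t ih =>
    rw [List.foldl_cons, ih, hkeys]
    rfl

theorem pv_update_of_subset (l : List String) (s : PySem.Set String) (h : ∀ e ∈ l, e ∈ s) :
    PySem.Set.update s l = s := by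
  induction l generalizing s with
  | nil => rfl
  | cons e t ih =>
    have : PySem.Set.update s (e :: t) = PySem.Set.update (PySem.Set.add s e) t := rfl
    rw [this, PySem.Set.add_of_mem (h e List.mem_cons_self)]
    exact ih s (fun x hx => h x (List.mem_cons_of_mem _ hx))

-- key-locality of A's step -------------------------------------------------------------------

theorem pvStepA_keys (i : Nat) (d : PySem.Dict String (List Int)) (e : String) :
    (pvStepA i d e).keys = PySem.Set.add d.keys e := by
  unfold pvStepA
  by_cases h : d.contains e = true
  · rw [if_pos h, PySem.Dict.keys_modify, PySem.Dict.keys_insert_of_contains _ _ h,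
      PySem.Set.add_of_mem ((PySem.Dict.contains_iff_mem_keys d e).mp h)]
  · have h' : d.contains e = false := by simpa using h
    rw [if_neg h, PySem.Dict.keys_modify,
      PySem.Dict.keys_insert_of_contains _ _ (by simp),
      PySem.Dict.keys_insert_of_not_contains d _ h',
      PySem.Set.add_of_not_mem (fun hm => by simp [(PySem.Dict.contains_iff_mem_keys d e).mpr hm] at h')]

theorem pvStepA_getD_ne (i : Nat) (d : PySem.Dict String (List Int)) (e k : String) (h : k ≠ e) :
    (pvStepA i d e).getD k pvFresh = d.getD k pvFresh := by
  unfold pvStepA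
  by_cases hc : d.contains e = true
  · rw [if_pos hc, PySem.Dict.getD_modify_of_ne _ _ _ h]
  · rw [if_neg hc, PySem.Dict.getD_modify_of_ne _ _ _ h, PySem.Dict.getD_insert_of_ne _ _ _ h]

theorem pvStepA_getD_self (i : Nat) (d : PySem.Dict String (List Int)) (e : String) :
    (pvStepA i d e).getD e pvFresh = pvBump i (d.getD e pvFresh) := by
  unfold pvStepA
  by_cases hc : d.contains e = true
  · rw [if_pos hc, PySem.Dict.getD_modify_self]
  · have hc' : d.contains e = false := by simpa using hc
    rw [if_neg hc, PySem.Dict.getD_modify_self, PySem.Dict.getD_insert_self,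
      PySem.Dict.getD_of_not_contains d _ hc']

-- key-locality of B's step -------------------------------------------------------------------

theorem pv_setdefault_keys (d : PySem.Dict String (List Int)) (e : String) :
    (d.setdefault e pvFresh).keys = PySem.Set.add d.keys e := by
  by_cases h : d.contains e = true
  · rw [PySem.Dict.setdefault_of_contains d _ h,
      PySem.Set.add_of_mem ((PySem.Dict.contains_iff_mem_keys d e).mp h)]
  · have h' : d.contains e = false := by simpa using h
    rw [PySem.Dict.setdefault_of_not_contains d _ h',
      PySem.Dict.keys_insert_of_not_contains d _ h',
      PySem.Set.add_of_not_mem (fun hm => by simp [(PySem.Dict.contains_iff_mem_keys d e).mpr hm] at h')]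

theorem pv_setdefault_getD_self (d : PySem.Dict String (List Int)) (e : String) :
    (d.setdefault e pvFresh).getD e pvFresh = d.getD e pvFresh := by
  by_cases h : d.contains e = true
  · rw [PySem.Dict.setdefault_of_contains d _ h]
  · have h' : d.contains e = false := by simpa using h
    rw [PySem.Dict.setdefault_of_not_contains d _ h', PySem.Dict.getD_insert_self,
      PySem.Dict.getD_of_not_contains d _ h']

theorem pv_setdefault_getD_ne (d : PySem.Dict String (List Int)) (e k : String) (h : k ≠ e) :
    (d.setdefault e pvFresh).getD k pvFresh = d.getD k pvFresh := by
  by_cases hc : d.contains e = true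
  · rw [PySem.Dict.setdefault_of_contains d _ hc]
  · have hc' : d.contains e = false := by simpa using hc
    rw [PySem.Dict.setdefault_of_not_contains d _ hc', PySem.Dict.getD_insert_of_ne _ _ _ h]

theorem pvStepB_keys (gs ps : List String) (d : PySem.Dict String (List Int)) (e : String) :
    (pvStepB gs ps d e).keys = PySem.Set.add d.keys e := by
  have hsd : (d.setdefault e pvFresh).contains e = true := by
    rw [PySem.Dict.contains_iff_mem_keys, pv_setdefault_keys]
    exact (PySem.Set.mem_add _ _ _).mpr (Or.inr rfl)
  unfold pvStepB
  split_ifs <;>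
    simp [PySem.Dict.keys_modify, PySem.Dict.keys_insert_of_contains,
      PySem.Dict.contains_modify, hsd, pv_setdefault_keys]

theorem pvStepB_getD_ne (gs ps : List String) (d : PySem.Dict String (List Int)) (e k : String) (h : k ≠ e) :
    (pvStepB gs ps d e).getD k pvFresh = d.getD k pvFresh := by
  unfold pvStepB
  split_ifs <;>
    rw [PySem.Dict.getD_modify_of_ne _ _ _ h, PySem.Dict.getD_modify_of_ne _ _ _ h] <;>
    first
      | rw [pv_setdefault_getD_ne d e k h]
      | rw [PySem.Dict.getD_modify_of_ne _ _ _ h, pv_setdefault_getD_ne d e k h]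

theorem pvStepB_getD_self_both (gs ps : List String) (d : PySem.Dict String (List Int)) (e : String)
    (hg : gs.contains e = true) (hp : ps.contains e = true) :
    (pvStepB gs ps d e).getD e pvFresh = pvBump 4 (pvBump 3 (pvBump 0 (d.getD e pvFresh))) := by
  unfold pvStepB
  rw [if_pos (by rw [hg, hp]; rfl)]
  rw [PySem.Dict.getD_modify_self, PySem.Dict.getD_modify_self, PySem.Dict.getD_modify_self,
    pv_setdefault_getD_self]

theorem pvStepB_getD_self_fp (gs ps : List String) (d : PySem.Dict String (List Int)) (e : String)
    (hg : gs.contains e = false) (hp : ps.contains e = true) :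
    (pvStepB gs ps d e).getD e pvFresh = pvBump 4 (pvBump 1 (d.getD e pvFresh)) := by
  unfold pvStepB
  rw [if_neg (by rw [hg]; simp), if_pos hp]
  rw [PySem.Dict.getD_modify_self, PySem.Dict.getD_modify_self, pv_setdefault_getD_self]

theorem pvStepB_getD_self_fn (gs ps : List String) (d : PySem.Dict String (List Int)) (e : String)
    (hp : ps.contains e = false) :
    (pvStepB gs ps d e).getD e pvFresh = pvBump 3 (pvBump 2 (d.getD e pvFresh)) := by
  unfold pvStepB
  rw [if_neg (by rw [hp]; simp), if_neg (by rw [hp]; simp)]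
  rw [PySem.Dict.getD_modify_self, PySem.Dict.getD_modify_self, pv_setdefault_getD_self]

-- ===== VERDICT (by name: the statement is the Claim_ definition above) =====
theorem check_and_insert_spec : Claim_equal_check_and_insert := by
  intro td gold pred _ hpre
  obtain ⟨hndK, hndG, hndP, -⟩ := hpre
  unfold Spec_check_and_insert check_and_insert check_and_insert_alt
  set TP := pred.filter (fun e => gold.contains e) with hTP
  set FP := pred.filter (fun e => !gold.contains e) with hFP
  set FN := gold.filter (fun e => !pred.contains e) with hFN
  set d0 := PySem.Dict.mk td with hd0
  set d1 := TP.foldl (pvStepA 0) d0 with hd1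
  set d2 := FP.foldl (pvStepA 1) d1 with hd2
  set d3 := FN.foldl (pvStepA 2) d2 with hd3
  set d4 := gold.foldl (pvStepA 3) d3 with hd4
  set d5 := pred.foldl (pvStepA 4) d4 with hd5
  set bB := pvStepB gold pred with hbB
  set dB := ((TP ++ FP ++ FN).foldl bB d0) with hdB
  -- membership facts
  have hTPmem : ∀ k, k ∈ TP ↔ k ∈ pred ∧ gold.contains k = true := by
    intro k; rw [hTP, List.mem_filter]
  have hFPmem : ∀ k, k ∈ FP ↔ k ∈ pred ∧ gold.contains k = false := by
    intro k; rw [hFP, List.mem_filter]; simp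
  have hFNmem : ∀ k, k ∈ FN ↔ k ∈ gold ∧ pred.contains k = false := by
    intro k; rw [hFN, List.mem_filter]; simp
  have hndTP : TP.Nodup := hndP.filter _
  have hndFP : FP.Nodup := hndP.filter _
  have hndFN : FN.Nodup := hndG.filter _
  -- B's fold split over the three disjoint segments
  have hBsplit : dB = FN.foldl bB (FP.foldl bB (TP.foldl bB d0)) := by
    rw [hdB, List.foldl_append, List.foldl_append]
  -- keys of both results
  have hkA : d5.keys = PySem.Set.update d0.keys (TP ++ FP ++ FN) := by
    have h3 : d3.keys = PySem.Set.update d0.keys (TP ++ FP ++ FN) := by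
      rw [hd3, hd2, hd1, pv_keys_foldl _ (pvStepA_keys 2), pv_keys_foldl _ (pvStepA_keys 1),
        pv_keys_foldl _ (pvStepA_keys 0)]
      simp [PySem.Set.update, List.foldl_append]
    have hsub : ∀ k, k ∈ gold ∨ k ∈ pred → k ∈ d3.keys := by
      intro k hk
      rw [h3]
      rw [PySem.Set.mem_update]
      right
      by_cases hkp : k ∈ pred
      · by_cases hkg : gold.contains k = true
        · simp only [List.mem_append]; left; left; exact (hTPmem k).mpr ⟨hkp, hkg⟩
        · simp only [List.mem_append]; left; right
          exact (hFPmem k).mpr ⟨hkp, by simpa using hkg⟩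
      · have hkg : k ∈ gold := by tauto
        simp only [List.mem_append]; right
        exact (hFNmem k).mpr ⟨hkg, by simpa using hkp⟩
    have h4 : d4.keys = d3.keys := by
      rw [hd4, pv_keys_foldl _ (pvStepA_keys 3)]
      exact pv_update_of_subset _ _ (fun e he => hsub e (Or.inl he))
    have h5 : d5.keys = d4.keys := by
      rw [hd5, pv_keys_foldl _ (pvStepA_keys 4), h4]
      exact pv_update_of_subset _ _ (fun e he => hsub e (Or.inr he))
    rw [h5, h4, h3]
  have hkB : dB.keys = PySem.Set.update d0.keys (TP ++ FP ++ FN) :=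
    pv_keys_foldl _ (pvStepB_keys gold pred) _ _
  have hkeq : d5.keys = dB.keys := by rw [hkA, hkB]
  -- keys of td are Nodup
  have hndK0 : d0.keys.Nodup := by
    simpa [PySem.Dict.keys] using hndK
  have hndKA : d5.keys.Nodup := by
    rw [hkA]; exact PySem.Set.nodup_update _ _ hndK0
  have hndKB : dB.keys.Nodup := by rw [← hkeq]; exact hndKA
  -- pointwise values agree
  have hval : ∀ k, d5.getD k pvFresh = dB.getD k pvFresh := by
    intro k
    by_cases hkTP : k ∈ TP
    · obtain ⟨hkp, hkg⟩ := (hTPmem k).mp hkTP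
      have hkFP : k ∉ FP := fun h => by have h2 := ((hFPmem k).mp h).2; rw [hkg] at h2; exact Bool.noConfusion h2
      have hkFN : k ∉ FN := fun h => by
        have h2 := ((hFNmem k).mp h).2
        simp [hkp] at h2
      have hA : d5.getD k pvFresh = pvBump 4 (pvBump 3 (pvBump 0 (d0.getD k pvFresh))) := by
        rw [hd5, pv_getD_foldl_of_mem _ (pvBump 4) (pvStepA_getD_ne 4) pred
            (fun d' e' _ => pvStepA_getD_self 4 d' e') hndP _ k hkp,
          hd4, pv_getD_foldl_of_mem _ (pvBump 3) (pvStepA_getD_ne 3) gold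
            (fun d' e' _ => pvStepA_getD_self 3 d' e') hndG _ k (List.mem_of_elem_eq_true hkg),
          hd3, pv_getD_foldl_of_not_mem _ (pvStepA_getD_ne 2) FN _ k hkFN,
          hd2, pv_getD_foldl_of_not_mem _ (pvStepA_getD_ne 1) FP _ k hkFP,
          hd1, pv_getD_foldl_of_mem _ (pvBump 0) (pvStepA_getD_ne 0) TP
            (fun d' e' _ => pvStepA_getD_self 0 d' e') hndTP _ k hkTP]
      have hB : dB.getD k pvFresh = pvBump 4 (pvBump 3 (pvBump 0 (d0.getD k pvFresh))) := by
        rw [hBsplit,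
          pv_getD_foldl_of_not_mem bB (pvStepB_getD_ne gold pred) FN _ k hkFN,
          pv_getD_foldl_of_not_mem bB (pvStepB_getD_ne gold pred) FP _ k hkFP,
          pv_getD_foldl_of_mem bB (fun v => pvBump 4 (pvBump 3 (pvBump 0 v)))
            (pvStepB_getD_ne gold pred) TP
            (fun d' e' he' => pvStepB_getD_self_both gold pred d' e'
              ((hTPmem e').mp he').2 (List.elem_eq_true_of_mem ((hTPmem e').mp he').1))
            hndTP _ k hkTP]
      rw [hA, hB]
    · by_cases hkFP : k ∈ FP
      · obtain ⟨hkp, hkg⟩ := (hFPmem k).mp hkFP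
        have hkgm : k ∉ gold := fun h => by simp [h] at hkg
        have hkFN : k ∉ FN := fun h => hkgm ((hFNmem k).mp h).1
        have hA : d5.getD k pvFresh = pvBump 4 (pvBump 1 (d0.getD k pvFresh)) := by
          rw [hd5, pv_getD_foldl_of_mem _ (pvBump 4) (pvStepA_getD_ne 4) pred
              (fun d' e' _ => pvStepA_getD_self 4 d' e') hndP _ k hkp,
            hd4, pv_getD_foldl_of_not_mem _ (pvStepA_getD_ne 3) gold _ k hkgm,
            hd3, pv_getD_foldl_of_not_mem _ (pvStepA_getD_ne 2) FN _ k hkFN,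
            hd2, pv_getD_foldl_of_mem _ (pvBump 1) (pvStepA_getD_ne 1) FP
              (fun d' e' _ => pvStepA_getD_self 1 d' e') hndFP _ k hkFP,
            hd1, pv_getD_foldl_of_not_mem _ (pvStepA_getD_ne 0) TP _ k hkTP]
        have hB : dB.getD k pvFresh = pvBump 4 (pvBump 1 (d0.getD k pvFresh)) := by
          rw [hBsplit,
            pv_getD_foldl_of_not_mem bB (pvStepB_getD_ne gold pred) FN _ k hkFN,
            pv_getD_foldl_of_mem bB (fun v => pvBump 4 (pvBump 1 v))
              (pvStepB_getD_ne gold pred) FP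
              (fun d' e' he' => pvStepB_getD_self_fp gold pred d' e'
                ((hFPmem e').mp he').2 (List.elem_eq_true_of_mem ((hFPmem e').mp he').1))
              hndFP _ k hkFP,
            pv_getD_foldl_of_not_mem bB (pvStepB_getD_ne gold pred) TP _ k hkTP]
        rw [hA, hB]
      · by_cases hkFN : k ∈ FN
        · obtain ⟨hkg, hkp⟩ := (hFNmem k).mp hkFN
          have hkpm : k ∉ pred := fun h => by simp [h] at hkp
          have hA : d5.getD k pvFresh = pvBump 3 (pvBump 2 (d0.getD k pvFresh)) := by
            rw [hd5, pv_getD_foldl_of_not_mem _ (pvStepA_getD_ne 4) pred _ k hkpm,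
              hd4, pv_getD_foldl_of_mem _ (pvBump 3) (pvStepA_getD_ne 3) gold
                (fun d' e' _ => pvStepA_getD_self 3 d' e') hndG _ k hkg,
              hd3, pv_getD_foldl_of_mem _ (pvBump 2) (pvStepA_getD_ne 2) FN
                (fun d' e' _ => pvStepA_getD_self 2 d' e') hndFN _ k hkFN,
              hd2, pv_getD_foldl_of_not_mem _ (pvStepA_getD_ne 1) FP _ k hkFP,
              hd1, pv_getD_foldl_of_not_mem _ (pvStepA_getD_ne 0) TP _ k hkTP]
          have hB : dB.getD k pvFresh = pvBump 3 (pvBump 2 (d0.getD k pvFresh)) := by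
            rw [hBsplit,
              pv_getD_foldl_of_mem bB (fun v => pvBump 3 (pvBump 2 v))
                (pvStepB_getD_ne gold pred) FN
                (fun d' e' he' => pvStepB_getD_self_fn gold pred d' e' ((hFNmem e').mp he').2)
                hndFN _ k hkFN,
              pv_getD_foldl_of_not_mem bB (pvStepB_getD_ne gold pred) FP _ k hkFP,
              pv_getD_foldl_of_not_mem bB (pvStepB_getD_ne gold pred) TP _ k hkTP]
          rw [hA, hB]
        · -- k in none of the three parts, hence in neither gold nor pred
          have hkpm : k ∉ pred := by
            intro hkp
            by_cases hkg : gold.contains k = true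
            · exact hkTP ((hTPmem k).mpr ⟨hkp, hkg⟩)
            · exact hkFP ((hFPmem k).mpr ⟨hkp, by simpa using hkg⟩)
          have hkgm : k ∉ gold := by
            intro hkg
            exact hkFN ((hFNmem k).mpr
              ⟨hkg, by cases h : pred.contains k with
                | false => rfl
                | true => exact absurd (List.mem_of_elem_eq_true h) hkpm⟩)
          rw [hd5, pv_getD_foldl_of_not_mem _ (pvStepA_getD_ne 4) pred _ k hkpm,
            hd4, pv_getD_foldl_of_not_mem _ (pvStepA_getD_ne 3) gold _ k hkgm,
            hd3, pv_getD_foldl_of_not_mem _ (pvStepA_getD_ne 2) FN _ k hkFN,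
            hd2, pv_getD_foldl_of_not_mem _ (pvStepA_getD_ne 1) FP _ k hkFP,
            hd1, pv_getD_foldl_of_not_mem _ (pvStepA_getD_ne 0) TP _ k hkTP,
            hBsplit,
            pv_getD_foldl_of_not_mem bB (pvStepB_getD_ne gold pred) FN _ k hkFN,
            pv_getD_foldl_of_not_mem bB (pvStepB_getD_ne gold pred) FP _ k hkFP,
            pv_getD_foldl_of_not_mem bB (pvStepB_getD_ne gold pred) TP _ k hkTP]
  -- conclude: items agree
  rw [PySem.Dict.items_eq_map_keys d5 hndKA pvFresh, PySem.Dict.items_eq_map_keys dB hndKB pvFresh,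
    hkeq]
  exact List.map_congr_left (fun k _ => by rw [hval k])
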